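-- pv_equiv track=rewrite | github.com/UngPang/Cording-Test-Practice | programers/후보키.py | solution
-- ===== SOURCE A (Python) =====
-- from itertools import combinations
--
-- def solution(relation):
--     N = len(relation[0])
--     attributes = list(zip(*relation))
--     key_idx_set = [] # attributions의 조합으로 이뤄진 키들의 집합(idx)
--     answer = 0
--
--     # attribute의 조합이 후보키인지 판별하는 함수
--     def is_candidate(key_idxes):
--         combi_key = []
--         for key_idx in key_idxes:
--             combi_key.append(attributes[key_idx])
--         combi_key = list(zip(*combi_key))
--
--         return True if len(combi_key) == len(set(combi_key)) else False
--
--     # 해당 attribute을 부분집합으로 하는 모든 set 삭제하기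
--     def remove_set(first_key_idx):
--         a = set(first_key_idx)
--         remove_list = []
--         for second_key_idx in key_idx_set:
--             b = set(second_key_idx)
--             if a != b and a.issubset(b):
--                 remove_list.append(second_key_idx)
--
--         for el in remove_list:
--             key_idx_set.remove(el)
--
--     for i in range(1, N+1):
--         for combi in combinations(range(0, N), i):
--             key_idx_set.append(combi)
--
--     for key_idx in key_idx_set:
--         if is_candidate(key_idx):
--             answer += 1
--             remove_set(key_idx)
--
--     return answer
-- ===== SOURCE B (Python) =====
-- def solution(relation):
--     n = len(relation[0])
--     # For every pair of rows, the bitmask of columns on which they DIFFER.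
--     # A column set is a key iff it intersects every such difference mask
--     # (a hitting set), and key-ness is monotone under adding columns, so a
--     # key is minimal iff it is a singleton or dropping any one column breaks it.
--     diffs = set()
--     seen = []
--     for row in relation:
--         for prev in seen:
--             diffs.add(sum(1 << c for c in range(n) if prev[c] != row[c]))
--         seen.append(row)
--
--     def hits(m):
--         return all(m & d for d in diffs)
--
--     count = 0
--     for m in range(1, 1 << n):
--         bits = [1 << c for c in range(n) if m & (1 << c)]
--         if hits(m) and (len(bits) == 1 or all(not hits(m ^ b) for b in bits)):
--             count += 1
--     return count
-- ===== Notes on version B (the rewrite author's own statement) =====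
-- stated objective: alternative
-- what changed: A enumerates all 2^N column combinations size-by-size, tests each by building and deduplicating the projected row tuples, and deletes supersets of found keys by rescanning and list.remove passes; B instead precomputes the set of pairwise row-difference bitmasks once, tests key-ness as a hitting-set condition on those masks (no row projections in the loop), and tests minimality locally by dropping one column at a time, justified by monotonicity of key-ness.
import Mathlib
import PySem

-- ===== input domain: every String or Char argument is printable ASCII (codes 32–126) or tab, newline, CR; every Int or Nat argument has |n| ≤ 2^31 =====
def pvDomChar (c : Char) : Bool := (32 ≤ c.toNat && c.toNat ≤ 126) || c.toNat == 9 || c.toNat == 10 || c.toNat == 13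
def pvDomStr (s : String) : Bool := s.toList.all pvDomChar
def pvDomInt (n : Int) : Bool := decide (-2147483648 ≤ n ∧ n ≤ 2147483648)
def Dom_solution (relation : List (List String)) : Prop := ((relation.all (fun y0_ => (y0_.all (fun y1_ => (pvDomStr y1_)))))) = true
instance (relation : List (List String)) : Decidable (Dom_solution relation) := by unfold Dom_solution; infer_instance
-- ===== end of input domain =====

-- B recasts the problem: it precomputes the bitmask of differing columns for every row
-- pair, tests key-ness as a hitting-set condition on those masks, and tests minimality
-- locally (dropping any one column) via monotonicity — no enumeration of column
-- combinations and no superset-deletion pass; equivalence is proved on Pre_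
-- (inputs where A returns).

-- ===== PORT A =====
-- zip(*xss): truncating transpose (exact: row r of the result pairs the r-th item of
-- every list, for r below the minimum length).
def pyMinLen (ls : List (List String)) : Nat :=
  match ls with
  | [] => 0
  | l :: rest => rest.foldl (fun a x => min a x.length) l.length

def pyZipStar (ls : List (List String)) : List (List String) :=
  (List.range (pyMinLen ls)).map (fun r => ls.map (fun l => l.getD r ""))

-- is_candidate: build combi_key = zip(*[attributes[k] for k in key_idxes]) and compare
-- len(combi_key) == len(set(combi_key)).  attributes[k] is in range under Pre_.
def solIsCand (relation : List (List String)) (keyIdxes : List Nat) : Bool :=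
  let attributes := pyZipStar relation
  let combiKey := pyZipStar (keyIdxes.map (fun k => attributes.getD k []))
  combiKey.length == (PySem.Set.ofList combiKey).length

-- the test 'a != b and a.issubset(b)' on a = set(first_key_idx), b = set(second_key_idx)
def solSupTest (a b : List Nat) : Bool :=
  !PySem.Set.equal (PySem.Set.ofList a) (PySem.Set.ofList b)
    && PySem.Set.issubset (PySem.Set.ofList a) (PySem.Set.ofList b)

-- remove_set: collect remove_list, then key_idx_set.remove(el) for each.
-- list.remove removes the first occurrence; every el comes from the list, so erase is exact.
def solRemoveSet (firstKeyIdx : List Nat) (keyIdxSet : List (List Nat)) : List (List Nat) :=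
  let removeList := keyIdxSet.filter (fun sk => solSupTest firstKeyIdx sk)
  removeList.foldl (fun ks el => ks.erase el) keyIdxSet

lemma pvFoldlEraseLen : ∀ (rs : List (List Nat)) (ks : List (List Nat)),
    (rs.foldl (fun ks el => ks.erase el) ks).length ≤ ks.length := by
  intro rs
  induction rs with
  | nil => intro ks; simp
  | cons r t ih =>
    intro ks
    calc (t.foldl (fun ks el => ks.erase el) (ks.erase r)).length
        ≤ (ks.erase r).length := ih _
      _ ≤ ks.length := List.length_erase_le ..

lemma pvRemoveSetLen (c : List Nat) (ks : List (List Nat)) :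
    (solRemoveSet c ks).length ≤ ks.length := pvFoldlEraseLen _ ks

-- 'for key_idx in key_idx_set:' — CPython iterates by index over the list while
-- remove_set mutates it; the cursor model below is exact.
def solLoop (relation : List (List String)) (ks : List (List Nat)) (i : Nat) (answer : Int) : Int :=
  if h : i < ks.length then
    if solIsCand relation ks[i] then
      solLoop relation (solRemoveSet ks[i] ks) (i + 1) (answer + 1)
    else
      solLoop relation ks (i + 1) answer
  else answer
termination_by ks.length - i
decreasing_by
  · have := pvRemoveSetLen ks[i] ks; omega
  · omega

def solution (relation : List (List String)) : Int :=
  let N := (relation.headD []).length   -- len(relation[0]); IndexError on [] is excluded by Pre_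
  let keyIdxSet := (List.range' 1 N).foldl
    (fun acc i => acc ++ PySem.List.combinations (List.range N) i) []
  solLoop relation keyIdxSet 0 0

-- ===== PORT B =====
-- sum(1 << c for c in range(n) if prev[c] != row[c]); prev[c]/row[c] are in range under Pre_
def altDiff (n : Nat) (a b : List String) : Nat :=
  ((List.range n).filter (fun c => a.getD c "" != b.getD c "")).foldl
    (fun acc c => acc + 2 ^ c) 0

-- diffs = set(); seen = []; for row in relation: for prev in seen: diffs.add(...); seen.append(row)
def altDiffs (n : Nat) (relation : List (List String)) : PySem.Set Nat :=
  (relation.foldl (fun (st : PySem.Set Nat × List (List String)) row =>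
      (st.2.foldl (fun ds prev => PySem.Set.add ds (altDiff n prev row)) st.1, st.2 ++ [row]))
    (PySem.Set.empty, [])).1

-- def hits(m): return all(m & d for d in diffs)   (order-independent consumption of the set)
def altHits (diffs : PySem.Set Nat) (m : Nat) : Bool :=
  diffs.all (fun d => m &&& d != 0)

-- bits = [1 << c for c in range(n) if m & (1 << c)];
-- hits(m) and (len(bits) == 1 or all(not hits(m ^ b) for b in bits))
def altPred (n : Nat) (diffs : PySem.Set Nat) (m : Nat) : Bool :=
  let bits := ((List.range n).filter (fun c => m &&& 2 ^ c != 0)).map (fun c => 2 ^ c)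
  altHits diffs m && (bits.length == 1 || bits.all (fun b => !altHits diffs (m ^^^ b)))

def solution_alt (relation : List (List String)) : Int :=
  let n := (relation.headD []).length   -- len(relation[0]); IndexError on [] is excluded by Pre_
  let diffs := altDiffs n relation
  (List.range' 1 (2 ^ n - 1)).foldl
    (fun cnt m => if altPred n diffs m then cnt + 1 else cnt) (0 : Int)

-- ===== PRECONDITION & SPEC =====
-- Pre_ excludes exactly the inputs where A raises IndexError: the empty relation
-- (relation[0]) and relations with a row shorter than the first row (attributes[key_idx]).
def Pre_solution (relation : List (List String)) : Prop :=
  relation ≠ [] ∧ ∀ r ∈ relation, (relation.headD []).length ≤ r.length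
instance (relation : List (List String)) : Decidable (Pre_solution relation) := by
  unfold Pre_solution; infer_instance

def pvWitness_solution : List (List String) := [["a", "b"], ["a", "c"]]

def Spec_solution (relation : List (List String)) (out : Int) : Prop := out = solution_alt relation
instance (relation : List (List String)) (out : Int) : Decidable (Spec_solution relation out) := by
  unfold Spec_solution; infer_instance

-- ===== CLAIM (what is proved, stated in full; the proofs are below) =====
def Claim_equal_solution : Prop := ∀ (relation : List (List String)), Dom_solution relation → Pre_solution relation → Spec_solution relation (solution relation)

-- ===== LEMMAS AND PROOFS =====

-- proof-side vocabulary: column subsets as bitmasks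
def pvN (relation : List (List String)) : Nat := (relation.headD []).length
def pvProj (relation : List (List String)) (c : List Nat) : List (List String) :=
  relation.map (fun row => c.map (fun k => row.getD k ""))
def pvMask (c : List Nat) : Nat := c.foldr (fun k a => 2 ^ k ||| a) 0
def pvCmb (N m : Nat) : List Nat := (List.range N).filter (fun j => m.testBit j)
def pvUq (relation : List (List String)) (m : Nat) : Bool :=
  decide (pvProj relation (pvCmb (pvN relation) m)).Nodup
def pvMin (relation : List (List String)) (m : Nat) : Bool :=
  (m != 0) && pvUq relation m
    && decide (∀ k, k < m → k ≠ 0 → k &&& m = k → pvUq relation k = false)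
def pvL0 (N : Nat) : List (List Nat) :=
  (List.range' 1 N).flatMap (fun i => PySem.List.combinations (List.range N) i)

-- masks ↔ index lists
lemma pvTestBit_mask (c : List Nat) (j : Nat) : (pvMask c).testBit j = decide (j ∈ c) := by
  induction c with
  | nil => simp [pvMask]
  | cons a t ih =>
    show ((2 ^ a ||| pvMask t).testBit j) = _
    simp only [Nat.testBit_or, Nat.testBit_two_pow, ih, List.mem_cons]
    by_cases h1 : a = j
    · simp [h1]
    · by_cases h2 : j ∈ t <;> simp [h1, h2, Ne.symm h1]

lemma pvMask_lt {c : List Nat} {N : Nat} (h : ∀ k ∈ c, k < N) : pvMask c < 2 ^ N := by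
  induction c with
  | nil => simp [pvMask]
  | cons a t ih =>
    show (2 ^ a ||| pvMask t) < 2 ^ N
    exact Nat.or_lt_two_pow (Nat.pow_lt_pow_right one_lt_two (h a List.mem_cons_self))
      (ih (fun k hk => h k (List.mem_cons_of_mem a hk)))

lemma pvMask_ne_zero {c : List Nat} (h : c ≠ []) : pvMask c ≠ 0 := by
  obtain ⟨a, t, rfl⟩ := List.exists_cons_of_ne_nil h
  intro h0
  have := pvTestBit_mask (a :: t) a
  rw [h0] at this
  simp [Nat.zero_testBit] at this

lemma pvSubmask_iff (k m : Nat) :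
    k &&& m = k ↔ ∀ j, k.testBit j = true → m.testBit j = true := by
  constructor
  · intro h j hj
    have := congrArg (fun x => x.testBit j) h
    simp only [Nat.testBit_and, hj, Bool.true_and] at this
    exact this
  · intro h
    apply Nat.eq_of_testBit_eq
    intro j
    rw [Nat.testBit_and]
    cases hk : k.testBit j
    · simp
    · simp [h j hk]

lemma pvSubmask_trans {a b c : Nat} (h1 : a &&& b = a) (h2 : b &&& c = b) : a &&& c = a := by
  rw [pvSubmask_iff] at *
  exact fun j hj => h2 j (h1 j hj)

lemma pvSubmask_antisymm {a b : Nat} (h1 : a &&& b = a) (h2 : b &&& a = b) : a = b := by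
  rw [pvSubmask_iff] at *
  apply Nat.eq_of_testBit_eq
  intro j
  cases ha : a.testBit j
  · cases hb : b.testBit j
    · rfl
    · rw [h2 j hb] at ha; exact ha.symm
  · rw [h1 j ha]

lemma pvSubmask_le {k m : Nat} (h : k &&& m = k) : k ≤ m := by
  conv_lhs => rw [← h]
  exact Nat.and_le_right

lemma pvMem_cmb {N m j : Nat} : j ∈ pvCmb N m ↔ j < N ∧ m.testBit j = true := by
  simp [pvCmb, List.mem_filter, List.mem_range]

lemma pvFilter_mem_of_sublist : ∀ {c l : List Nat}, c.Sublist l → l.Nodup →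
    l.filter (fun x => decide (x ∈ c)) = c := by
  intro c l h
  induction h with
  | slnil => simp
  | @cons l₁ l₂ a h ih =>
    intro hnd
    rw [List.nodup_cons] at hnd
    have ha : a ∉ l₁ := fun hx => hnd.1 (h.subset hx)
    have ha' : ¬ (a ∈ l₁) := ha
    simp only [List.filter_cons, decide_eq_true_eq, if_neg ha']
    exact ih hnd.2
  | @cons₂ l₁ l₂ a h ih =>
    intro hnd
    rw [List.nodup_cons] at hnd
    simp only [List.filter_cons, List.mem_cons, decide_eq_true_eq, true_or, if_true]
    congr 1
    rw [List.filter_congr (l := l₂) (q := fun x => decide (x ∈ l₁)) ?he]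
    · exact ih hnd.2
    · intro x hx
      have : x ≠ a := fun he => hnd.1 (he ▸ hx)
      simp [this]

lemma pvCmb_mask {c : List Nat} {N : Nat} (hc : c.Sublist (List.range N)) :
    pvCmb N (pvMask c) = c := by
  unfold pvCmb
  rw [List.filter_congr (q := fun x => decide (x ∈ c)) (fun x _ => pvTestBit_mask c x)]
  exact pvFilter_mem_of_sublist hc (List.nodup_range)

lemma pvMask_cmb {N m : Nat} (h : m < 2 ^ N) : pvMask (pvCmb N m) = m := by
  apply Nat.eq_of_testBit_eq
  intro j
  rw [pvTestBit_mask]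
  by_cases hj : j < N
  · simp [pvMem_cmb, hj]
  · have hle : 2 ^ N ≤ 2 ^ j := Nat.pow_le_pow_right (by norm_num) (le_of_not_gt hj)
    rw [Nat.testBit_lt_two_pow (lt_of_lt_of_le h hle)]
    simp [pvMem_cmb, hj]

lemma pvCmb_ne_nil {N m : Nat} (h0 : m ≠ 0) (h : m < 2 ^ N) : pvCmb N m ≠ [] := by
  intro he
  apply h0
  have := pvMask_cmb (N := N) (m := m) h
  rw [he] at this
  simpa [pvMask] using this.symm

lemma pvMask_and_iff (a b : List Nat) :
    pvMask a &&& pvMask b = pvMask a ↔ ∀ x ∈ a, x ∈ b := by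
  rw [pvSubmask_iff]
  constructor
  · intro h x hx
    have := h x (by rw [pvTestBit_mask]; simpa)
    rw [pvTestBit_mask] at this
    simpa using this
  · intro h j hj
    rw [pvTestBit_mask] at hj ⊢
    simp only [decide_eq_true_eq] at hj ⊢
    exact h j hj

lemma pvMask_eq_iff_mem (a b : List Nat) :
    pvMask a = pvMask b ↔ ∀ x, x ∈ a ↔ x ∈ b := by
  constructor
  · intro h x
    have := pvTestBit_mask a x
    rw [h, pvTestBit_mask b x] at this
    constructor <;> intro hx <;> [skip; skip] <;> simp_all
  · intro h
    apply Nat.eq_of_testBit_eq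
    intro j
    rw [pvTestBit_mask, pvTestBit_mask]
    simp [h j]

lemma pvMask_inj {a b : List Nat} {N : Nat} (ha : a.Sublist (List.range N))
    (hb : b.Sublist (List.range N)) (h : pvMask a = pvMask b) : a = b := by
  rw [← pvCmb_mask ha, ← pvCmb_mask hb, h]

-- the remove_set superset test, in mask language
lemma pvSupTest_iff (a b : List Nat) :
    solSupTest a b = true ↔ pvMask a &&& pvMask b = pvMask a ∧ pvMask a ≠ pvMask b := by
  unfold solSupTest
  rw [Bool.and_eq_true, Bool.not_eq_true', ← Bool.not_eq_true]
  rw [PySem.Set.equal_iff, PySem.Set.issubset_iff]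
  rw [pvMask_and_iff, Ne, pvMask_eq_iff_mem]
  simp only [PySem.Set.mem_ofList]
  tauto

lemma pvSubset_len {a b : List Nat} {N : Nat} (ha : a.Sublist (List.range N))
    (hb : b.Sublist (List.range N)) (hsub : ∀ x ∈ a, x ∈ b) (hne : a ≠ b) :
    a.length < b.length := by
  have hs : a.Sublist b := by
    rw [← pvFilter_mem_of_sublist ha List.nodup_range,
      ← pvFilter_mem_of_sublist hb List.nodup_range]
    exact List.monotone_filter_right _ (by simpa using hsub)
  rcases Nat.lt_or_ge a.length b.length with h | h
  · exact h
  · exact absurd ((List.Sublist.length_eq hs).mp (le_antisymm hs.length_le h)) hne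

-- set(l) and duplicate detection
lemma pvOfList_sublist (l : List (List String)) : (PySem.Set.ofList l).Sublist l := by
  induction l using List.reverseRecOn with
  | nil => simp [PySem.Set.ofList]
  | append_singleton xs x ih =>
    rw [PySem.Set.ofList_append_singleton, PySem.Set.add_eq_ite]
    by_cases hx : x ∈ PySem.Set.ofList xs
    · rw [if_pos hx]
      exact ih.trans (List.sublist_append_left xs [x])
    · rw [if_neg hx]
      exact ih.append (List.Sublist.refl [x])

lemma pvLenSet_iff (l : List (List String)) :
    (PySem.Set.ofList l).length = l.length ↔ l.Nodup := by
  constructor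
  · intro h
    have := (List.Sublist.length_eq (pvOfList_sublist l)).mp h
    rw [← this]
    exact PySem.Set.nodup_ofList l
  · intro h
    rw [PySem.Set.ofList_eq_self_of_nodup l h]

-- zip(*…) computations
lemma pvMinLen_const {L : List (List String)} {R : Nat} (hne : L ≠ [])
    (h : ∀ x ∈ L, x.length = R) : pyMinLen L = R := by
  obtain ⟨l, t, rfl⟩ := List.exists_cons_of_ne_nil hne
  show t.foldl (fun a x => min a x.length) l.length = R
  rw [h l List.mem_cons_self]
  have : ∀ t' : List (List String), (∀ x ∈ t', x.length = R) →
      t'.foldl (fun a x => min a x.length) R = R := by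
    intro t'
    induction t' with
    | nil => intro _; rfl
    | cons y ys ih =>
      intro hy
      show ys.foldl _ (min R y.length) = R
      rw [hy y List.mem_cons_self, min_self]
      exact ih (fun x hx => hy x (List.mem_cons_of_mem y hx))
  exact this t (fun x hx => h x (List.mem_cons_of_mem l hx))

lemma pvZipStar_core (relation : List (List String)) (c : List Nat) (hcne : c ≠ []) :
    pyZipStar (c.map (fun k => relation.map (fun row => row.getD k ""))) =
      pvProj relation c := by
  have hlen : pyMinLen (c.map (fun k => relation.map (fun row => row.getD k ""))) =
      relation.length := by
    apply pvMinLen_const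
    · simpa using hcne
    · intro x hx
      obtain ⟨k, _, rfl⟩ := List.mem_map.mp hx
      simp
  unfold pyZipStar pvProj
  rw [hlen]
  apply List.ext_getElem
  · simp
  · intro r h1 h2
    simp only [List.getElem_map, List.getElem_range, List.map_map]
    apply List.map_congr_left
    intro k _
    simp only [Function.comp]
    have hr : r < relation.length := by simpa using h1
    rw [List.getD_eq_getElem?_getD, List.getElem?_map,
      List.getElem?_eq_getElem hr]
    simp

lemma pvAttr_getD {relation : List (List String)} (hne : relation ≠ [])
    (hall : ∀ r ∈ relation, pvN relation ≤ r.length) {k : Nat} (hk : k < pvN relation) :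
    (pyZipStar relation).getD k [] = relation.map (fun row => row.getD k "") := by
  have hmin : pyMinLen relation = pvN relation := by
    obtain ⟨l, t, rfl⟩ := List.exists_cons_of_ne_nil hne
    show t.foldl (fun a x => min a x.length) l.length = _
    have hstart : l.length = pvN (l :: t) := rfl
    rw [hstart]
    have : ∀ t' : List (List String), (∀ x ∈ t', pvN (l :: t) ≤ x.length) →
        t'.foldl (fun a x => min a x.length) (pvN (l :: t)) = pvN (l :: t) := by
      intro t'
      induction t' with
      | nil => intro _; rfl
      | cons y ys ih =>
        intro hy
        show ys.foldl _ (min _ y.length) = _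
        rw [min_eq_left (hy y List.mem_cons_self)]
        exact ih (fun x hx => hy x (List.mem_cons_of_mem y hx))
    exact this t (fun x hx => hall x (List.mem_cons_of_mem l hx))
  unfold pyZipStar
  rw [hmin]
  exact PySem.List.getD_map_range _ _ _ _ hk

lemma pvIsCand_iff {relation : List (List String)} (hne : relation ≠ [])
    (hall : ∀ r ∈ relation, pvN relation ≤ r.length) {c : List Nat}
    (hc : c.Sublist (List.range (pvN relation))) (hcne : c ≠ []) :
    solIsCand relation c = pvUq relation (pvMask c) := by
  have hmap : c.map (fun k => (pyZipStar relation).getD k []) =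
      c.map (fun k => relation.map (fun row => row.getD k "")) := by
    apply List.map_congr_left
    intro k hk
    exact pvAttr_getD hne hall (List.mem_range.mp (hc.subset hk))
  show ((pyZipStar (c.map (fun k => (pyZipStar relation).getD k []))).length ==
    (PySem.Set.ofList (pyZipStar (c.map (fun k => (pyZipStar relation).getD k [])))).length)
    = pvUq relation (pvMask c)
  rw [hmap, pvZipStar_core relation c hcne]
  unfold pvUq
  rw [pvCmb_mask hc]
  rw [Bool.eq_iff_iff, beq_iff_eq, decide_eq_true_eq, eq_comm]
  exact pvLenSet_iff _

-- enumeration facts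
lemma pvNodup_combinations : ∀ (xs : List Nat) (r : Nat), xs.Nodup →
    (PySem.List.combinations xs r).Nodup := by
  intro xs
  induction xs with
  | nil =>
    intro r _
    cases r with
    | zero => simp [PySem.List.combinations_zero]
    | succ r => simp [PySem.List.combinations_nil_succ]
  | cons x t ih =>
    intro r hnd
    rw [List.nodup_cons] at hnd
    cases r with
    | zero => simp [PySem.List.combinations_zero]
    | succ r =>
      rw [PySem.List.combinations_cons_succ]
      apply List.Nodup.append
      · exact (ih r hnd.2).map (fun a b hab => by simpa using hab)
      · exact ih (r + 1) hnd.2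
      · intro a ha hb
        obtain ⟨a', _, rfl⟩ := List.mem_map.mp ha
        have hsub := (PySem.List.mem_combinations_iff t (r + 1) _).mp hb
        exact hnd.1 (hsub.1.subset List.mem_cons_self)

lemma pvKeyIdxSet_eq (N : Nat) :
    (List.range' 1 N).foldl (fun acc i => acc ++ PySem.List.combinations (List.range N) i) []
      = pvL0 N := by
  simpa using PySem.List.foldl_append_eq_flatMap
    (fun i => PySem.List.combinations (List.range N) i) (List.range' 1 N) []

lemma pvMem_L0 {N : Nat} {c : List Nat} :
    c ∈ pvL0 N ↔ c.Sublist (List.range N) ∧ c ≠ [] := by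
  unfold pvL0
  simp only [List.mem_flatMap, PySem.List.mem_combinations_iff, List.mem_range'_1]
  constructor
  · rintro ⟨i, ⟨hi1, _⟩, hsub, hlen⟩
    exact ⟨hsub, by rw [← List.length_pos_iff]; omega⟩
  · rintro ⟨hsub, hne⟩
    refine ⟨c.length, ⟨?_, ?_⟩, hsub, rfl⟩
    · exact List.length_pos_of_ne_nil hne
    · have := hsub.length_le
      simp only [List.length_range] at this
      omega

lemma pvNodup_L0 (N : Nat) : (pvL0 N).Nodup := by
  unfold pvL0
  rw [List.nodup_flatMap]
  constructor
  · intro i _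
    exact pvNodup_combinations (List.range N) i List.nodup_range
  · have : (List.range' 1 N).Pairwise (· < ·) := List.pairwise_lt_range' ..
    apply this.imp ?_
    intro i j hij a ha hb
    have h1 := (PySem.List.mem_combinations_iff _ _ _).mp ha |>.2
    have h2 := (PySem.List.mem_combinations_iff _ _ _).mp hb |>.2
    omega

lemma pvPairwise_L0 (N : Nat) : (pvL0 N).Pairwise (fun a b => a.length ≤ b.length) := by
  unfold pvL0
  rw [List.pairwise_flatMap]
  constructor
  · intro i _
    apply List.pairwise_of_forall_mem_list
    intro x hx y hy
    rw [(PySem.List.mem_combinations_iff _ _ _).mp hx |>.2,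
      (PySem.List.mem_combinations_iff _ _ _).mp hy |>.2]
  · have : (List.range' 1 N).Pairwise (· < ·) := List.pairwise_lt_range' ..
    apply this.imp ?_
    intro i j hij x hx y hy
    rw [(PySem.List.mem_combinations_iff _ _ _).mp hx |>.2,
      (PySem.List.mem_combinations_iff _ _ _).mp hy |>.2]
    omega

-- remove_set is a filter on a duplicate-free list
lemma pvRemoveSet_eq {c : List Nat} {ks : List (List Nat)} (h : ks.Nodup) :
    solRemoveSet c ks = ks.filter (fun b => !solSupTest c b) := by
  unfold solRemoveSet
  rw [← List.diff_eq_foldl, h.diff_eq_filter]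
  apply List.filter_congr
  intro b hb
  by_cases hs : solSupTest c b
  · simp [hs, List.mem_filter, hb]
  · simp [hs, List.mem_filter, hb]

-- every unique key contains a minimal unique key
lemma pvDescent (relation : List (List String)) : ∀ m, pvUq relation m = true → m ≠ 0 →
    ∃ k, k &&& m = k ∧ pvMin relation k = true := by
  intro m
  induction m using Nat.strong_induction_on with
  | _ m ih =>
    intro hU h0
    by_cases hmin : pvMin relation m = true
    · exact ⟨m, Nat.and_self m, hmin⟩
    · have : ∃ k, k < m ∧ k ≠ 0 ∧ k &&& m = k ∧ pvUq relation k = true := by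
        simp only [pvMin, hU, Bool.and_eq_true, bne_iff_ne, ne_eq, decide_eq_true_eq,
          Bool.and_true, not_and, not_forall] at hmin
        obtain ⟨k, hk1, hk2, hk3, hk4⟩ := hmin h0
        exact ⟨k, hk1, hk2, hk3, by simpa using hk4⟩
      obtain ⟨k, hklt, hk0, hkand, hkU⟩ := this
      obtain ⟨k', hk'and, hk'min⟩ := ih k hklt hkU hk0
      exact ⟨k', pvSubmask_trans hk'and hkand, hk'min⟩

-- A's mutating loop counts exactly the minimal unique keys among the remaining entries
lemma pvLoop_spec (relation : List (List String)) (hne : relation ≠ [])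
    (hall : ∀ r ∈ relation, pvN relation ≤ r.length) :
    ∀ (fuel : Nat) (ks : List (List Nat)) (i : Nat) (ans : Int),
      ks.length - i ≤ fuel →
      ks.Sublist (pvL0 (pvN relation)) →
      (∀ c ∈ ks.drop i, ∀ m, pvMin relation m = true → m &&& pvMask c = m →
        m ≠ pvMask c → pvCmb (pvN relation) m ∈ ks.drop i) →
      solLoop relation ks i ans =
        ans + ((ks.drop i).countP (fun c => pvMin relation (pvMask c)) : Int) := by
  intro fuel
  induction fuel with
  | zero =>
    intro ks i ans hfuel hsub hinv
    have hge : ks.length ≤ i := by omega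
    rw [solLoop.eq_def, dif_neg (by omega), List.drop_eq_nil_of_le hge]
    simp
  | succ fuel ih =>
    intro ks i ans hfuel hsub hinv
    by_cases h : i < ks.length
    case neg =>
      rw [solLoop.eq_def, dif_neg h, List.drop_eq_nil_of_le (by omega)]
      simp
    case pos =>
    have hdrop : ks.drop i = ks[i] :: ks.drop (i + 1) := List.drop_eq_getElem_cons h
    have hcks : ks[i] ∈ ks := List.getElem_mem h
    have hcL0 : ks[i] ∈ pvL0 (pvN relation) := hsub.subset hcks
    obtain ⟨hcr, hcne⟩ := pvMem_L0.mp hcL0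
    have hclt : ∀ k ∈ ks[i], k < pvN relation := fun k hk => List.mem_range.mp (hcr.subset hk)
    have hbridge : solIsCand relation ks[i] = pvUq relation (pvMask ks[i]) :=
      pvIsCand_iff hne hall hcr hcne
    have hndks : ks.Nodup := (pvNodup_L0 (pvN relation)).sublist hsub
    have hpw : ks.Pairwise (fun a b => a.length ≤ b.length) :=
      (pvPairwise_L0 (pvN relation)).sublist hsub
    -- if ks[i] is unique then it is minimal (no unique key strictly below it survives)
    have hkey : pvUq relation (pvMask ks[i]) = true → pvMin relation (pvMask ks[i]) = true := by
      intro hU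
      simp only [pvMin, Bool.and_eq_true, bne_iff_ne, ne_eq, decide_eq_true_eq]
      refine ⟨⟨pvMask_ne_zero hcne, hU⟩, ?_⟩
      intro k hklt hk0 hkand
      rw [Bool.eq_false_iff]
      intro hkU
      obtain ⟨k', hk'sub, hk'min⟩ := pvDescent relation k hkU hk0
      have hk'subc : k' &&& pvMask ks[i] = k' := pvSubmask_trans hk'sub hkand
      have hk'ne : k' ≠ pvMask ks[i] := by
        intro he
        rw [he] at hk'sub
        have := pvSubmask_antisymm hkand hk'sub
        omega
      have hmem := hinv ks[i] (by rw [hdrop]; exact List.mem_cons_self) k' hk'min hk'subc hk'ne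
      rw [hdrop] at hmem
      have hk'lt2N : k' < 2 ^ pvN relation :=
        lt_of_le_of_lt (pvSubmask_le hk'subc) (pvMask_lt hclt)
      have hcmbne : pvCmb (pvN relation) k' ≠ ks[i] := by
        intro he
        apply hk'ne
        rw [← pvMask_cmb hk'lt2N, he]
      have hmem' : pvCmb (pvN relation) k' ∈ ks.drop (i + 1) := by
        rcases List.mem_cons.mp hmem with he | hm
        · exact absurd he hcmbne
        · exact hm
      have hlenlt : (pvCmb (pvN relation) k').length < ks[i].length := by
        apply pvSubset_len (N := pvN relation) List.filter_sublist hcr ?_ hcmbne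
        intro x hx
        have hxk' : k'.testBit x = true := (pvMem_cmb.mp hx).2
        have hxc := (pvSubmask_iff k' (pvMask ks[i])).mp hk'subc x hxk'
        rw [pvTestBit_mask] at hxc
        simpa using hxc
      have hpwd : (ks.drop i).Pairwise (fun a b => a.length ≤ b.length) := hpw.drop
      rw [hdrop] at hpwd
      have := (List.pairwise_cons.mp hpwd).1 _ hmem'
      omega
    rw [solLoop.eq_def, dif_pos h]
    by_cases hcand : solIsCand relation ks[i] = true
    case pos =>
      rw [if_pos hcand]
      have hU : pvUq relation (pvMask ks[i]) = true := by rw [← hbridge]; exact hcand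
      have hMin := hkey hU
      have hrs : solRemoveSet ks[i] ks = ks.filter (fun b => !solSupTest ks[i] b) :=
        pvRemoveSet_eq hndks
      -- the filter keeps the first i+1 entries (no strict superset of ks[i] sits there)
      have hikeep : ∀ b ∈ ks.take (i + 1), (!solSupTest ks[i] b) = true := by
        intro b hb
        rw [List.take_add_one, List.getElem?_eq_getElem h] at hb
        rcases List.mem_append.mp hb with hb | hb
        · -- b comes before ks[i], so b.length ≤ ks[i].length, no strict superset
          have hbks : b ∈ ks := List.mem_of_mem_take hb
          obtain ⟨hbr, _⟩ := pvMem_L0.mp (hsub.subset hbks)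
          have hpwt : (ks.take (i + 1)).Pairwise (fun a b => a.length ≤ b.length) :=
            hpw.sublist (List.take_sublist ..)
          rw [List.take_add_one, List.getElem?_eq_getElem h] at hpwt
          have hble : b.length ≤ ks[i].length := by
            have := (List.pairwise_append.mp hpwt).2.2 b hb ks[i] (by simp)
            exact this
          rw [Bool.not_eq_true', Bool.eq_false_iff]
          intro hsup
          obtain ⟨hand, hnemask⟩ := (pvSupTest_iff _ _).mp hsup
          have hsubm := (pvMask_and_iff _ _).mp hand
          have hnelist : ks[i] ≠ b := fun he => hnemask (he ▸ rfl)
          have := pvSubset_len hcr hbr hsubm hnelist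
          omega
        · -- b = ks[i] itself: the test requires a != b
          simp only [Option.toList_some, List.mem_singleton] at hb
          subst hb
          rw [Bool.not_eq_true', Bool.eq_false_iff]
          intro hsup
          exact ((pvSupTest_iff _ _).mp hsup).2 rfl
      have hsplit : ks.take (i + 1) ++ (ks.drop (i + 1)).filter (fun b => !solSupTest ks[i] b) =
          ks.filter (fun b => !solSupTest ks[i] b) := by
        have h0 := congrArg (List.filter (fun b => !solSupTest ks[i] b))
          (List.take_append_drop (i + 1) ks)
        rw [List.filter_append, List.filter_eq_self.mpr hikeep] at h0
        exact h0
      have hdrop' : (solRemoveSet ks[i] ks).drop (i + 1) =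
          (ks.drop (i + 1)).filter (fun b => !solSupTest ks[i] b) := by
        rw [hrs, ← hsplit]
        have hlt : (ks.take (i + 1)).length = i + 1 := List.length_take_of_le (by omega)
        exact List.drop_left' hlt
      -- supersets of a unique key are never minimal; minimal keys survive the filter
      have hsurvive : ∀ b : List Nat, pvMin relation (pvMask b) = true →
          (!solSupTest ks[i] b) = true := by
        intro b hbmin
        rw [Bool.not_eq_true', Bool.eq_false_iff]
        intro hsup
        obtain ⟨hand, hnemask⟩ := (pvSupTest_iff _ _).mp hsup
        simp only [pvMin, Bool.and_eq_true, decide_eq_true_eq] at hbmin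
        have hc0 : pvMask ks[i] ≠ 0 := pvMask_ne_zero hcne
        have hclt' : pvMask ks[i] < pvMask b :=
          lt_of_le_of_ne (pvSubmask_le hand) hnemask
        have := hbmin.2 (pvMask ks[i]) hclt' hc0 hand
        rw [this] at hU
        exact Bool.false_ne_true hU
      rw [ih (solRemoveSet ks[i] ks) (i + 1) (ans + 1) ?hf ?hs ?hi]
      case hf =>
        have := pvRemoveSetLen ks[i] ks
        omega
      case hs =>
        rw [hrs]
        exact List.filter_sublist.trans hsub
      case hi =>
        intro c' hc' m hm hsubm hnem
        rw [hdrop'] at hc' ⊢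
        have hc'2 : c' ∈ ks.drop (i + 1) := (List.mem_filter.mp hc').1
        have hmem := hinv c' (by rw [hdrop]; exact List.mem_cons_of_mem _ hc'2) m hm hsubm hnem
        rw [hdrop] at hmem
        obtain ⟨hc'r, _⟩ := pvMem_L0.mp (hsub.subset (List.mem_of_mem_drop hc'2))
        have hm2N : m < 2 ^ pvN relation := by
          have : ∀ k ∈ c', k < pvN relation := fun k hk => List.mem_range.mp (hc'r.subset hk)
          exact lt_of_le_of_lt (pvSubmask_le hsubm) (pvMask_lt this)
        rcases List.mem_cons.mp hmem with he | hm2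
        · -- the minimal key would be ks[i] itself, but then c' was just removed
          exfalso
          have hmc : m = pvMask ks[i] := by rw [← pvMask_cmb hm2N, he]
          have hkeepc' := (List.mem_filter.mp hc').2
          rw [Bool.not_eq_true', Bool.eq_false_iff] at hkeepc'
          apply hkeepc'
          rw [pvSupTest_iff]
          rw [← hmc]
          exact ⟨hsubm, hnem⟩
        · refine List.mem_filter.mpr ⟨hm2, hsurvive _ ?_⟩
          rw [pvMask_cmb hm2N]
          exact hm
      -- count: the removed entries are non-minimal, ks[i] itself is minimal
      rw [hdrop', hdrop, List.countP_cons, if_pos hMin]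
      have hcnt : ((ks.drop (i + 1)).filter (fun b => !solSupTest ks[i] b)).countP
          (fun c => pvMin relation (pvMask c)) =
          (ks.drop (i + 1)).countP (fun c => pvMin relation (pvMask c)) := by
        rw [List.countP_filter]
        apply List.countP_congr
        intro b _
        constructor
        · rintro hb
          rw [Bool.and_eq_true] at hb
          exact hb.1
        · intro hb
          rw [Bool.and_eq_true]
          exact ⟨hb, hsurvive b hb⟩
      rw [hcnt]
      push_cast
      ring
    case neg =>
      rw [if_neg hcand]
      have hU : pvUq relation (pvMask ks[i]) = false := by
        rw [← hbridge]
        simpa using hcand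
      have hMinf : pvMin relation (pvMask ks[i]) = false := by
        rw [Bool.eq_false_iff]
        intro hm
        simp only [pvMin, Bool.and_eq_true] at hm
        rw [hm.1.2] at hU
        simp at hU
      rw [ih ks (i + 1) ans (by omega) hsub ?hi2]
      case hi2 =>
        intro c' hc' m hm hsubm hnem
        have hmem := hinv c' (by rw [hdrop]; exact List.mem_cons_of_mem _ hc') m hm hsubm hnem
        rw [hdrop] at hmem
        rcases List.mem_cons.mp hmem with he | hm2
        · exfalso
          obtain ⟨hc'r, _⟩ := pvMem_L0.mp (hsub.subset (List.mem_of_mem_drop hc'))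
          have hm2N : m < 2 ^ pvN relation := by
            have : ∀ k ∈ c', k < pvN relation := fun k hk => List.mem_range.mp (hc'r.subset hk)
            exact lt_of_le_of_lt (pvSubmask_le hsubm) (pvMask_lt this)
          have hmc : m = pvMask ks[i] := by rw [← pvMask_cmb hm2N, he]
          simp only [pvMin, Bool.and_eq_true] at hm
          rw [hmc] at hm
          rw [hm.1.2] at hU
          simp at hU
        · exact hm2
      rw [hdrop, List.countP_cons, if_neg (by rw [hMinf]; simp)]
      norm_num

lemma pvPerm (N : Nat) : ((pvL0 N).map pvMask).Perm (List.range' 1 (2 ^ N - 1)) := by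
  rw [List.perm_ext_iff_of_nodup ?nd1 (List.nodup_range' 1)]
  case nd1 =>
    refine (List.nodup_map_iff_inj_on (pvNodup_L0 N)).mpr ?_
    intro x hx y hy hxy
    exact pvMask_inj (pvMem_L0.mp hx).1 (pvMem_L0.mp hy).1 hxy
  intro m
  rw [List.mem_map, List.mem_range'_1]
  constructor
  · rintro ⟨c, hc, rfl⟩
    obtain ⟨hsub, hne⟩ := pvMem_L0.mp hc
    have h1 : pvMask c ≠ 0 := pvMask_ne_zero hne
    have h2 : pvMask c < 2 ^ N := pvMask_lt (fun k hk => List.mem_range.mp (hsub.subset hk))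
    omega
  · rintro ⟨h1, h2⟩
    have hm0 : m ≠ 0 := by omega
    have hmlt : m < 2 ^ N := by omega
    exact ⟨pvCmb N m, pvMem_L0.mpr ⟨List.filter_sublist, pvCmb_ne_nil hm0 hmlt⟩,
      pvMask_cmb hmlt⟩

-- ===== B-side lemmas =====

-- small bit facts
lemma pvExistsBit {x : Nat} (h : x ≠ 0) : ∃ j, x.testBit j = true := by
  by_contra hc
  exact h (Nat.eq_of_testBit_eq (fun j => by
    rw [Nat.zero_testBit]
    exact Bool.eq_false_iff.mpr (fun ht => hc ⟨j, ht⟩)))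

lemma pvBitLt {m c N : Nat} (hmlt : m < 2 ^ N) (h : m.testBit c = true) : c < N := by
  by_contra hc
  have hle : 2 ^ N ≤ 2 ^ c := Nat.pow_le_pow_right (by norm_num) (le_of_not_gt hc)
  rw [Nat.testBit_lt_two_pow (lt_of_lt_of_le hmlt hle)] at h
  exact Bool.false_ne_true h

lemma pvAndZero (x y : Nat) :
    x &&& y = 0 ↔ ∀ j, ¬(x.testBit j = true ∧ y.testBit j = true) := by
  constructor
  · intro h j hj
    have := congrArg (fun z => z.testBit j) h
    simp only [Nat.testBit_and, hj.1, hj.2, Nat.zero_testBit] at this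
    exact Bool.false_ne_true this.symm
  · intro h
    apply Nat.eq_of_testBit_eq
    intro j
    rw [Nat.testBit_and, Nat.zero_testBit]
    cases hx : x.testBit j
    · simp
    · cases hy : y.testBit j
      · simp
      · exact absurd ⟨hx, hy⟩ (h j)

-- 2^k divides numbers whose bits all sit at or above k
lemma pvTwoPowDvd {x k : Nat} (h : ∀ j, x.testBit j = true → k ≤ j) : 2 ^ k ∣ x := by
  apply Nat.dvd_of_mod_eq_zero
  rw [← Nat.and_two_pow_sub_one_eq_mod]
  rw [pvAndZero]
  intro j hj
  have h1 := h j hj.1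
  have h2 := hj.2
  rw [Nat.testBit_two_pow_sub_one] at h2
  simp only [decide_eq_true_eq] at h2
  omega

-- a sum of 2^c over a strictly increasing index list is the corresponding mask
lemma pvFoldlPow : ∀ (l : List Nat) (s : Nat), l.Pairwise (· < ·) →
    l.foldl (fun acc c => acc + 2 ^ c) s = s + pvMask l := by
  intro l
  induction l with
  | nil => intro s _; simp [pvMask]
  | cons c t ih =>
    intro s hpw
    rw [List.pairwise_cons] at hpw
    show t.foldl (fun acc c => acc + 2 ^ c) (s + 2 ^ c) = s + pvMask (c :: t)
    rw [ih (s + 2 ^ c) hpw.2]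
    have hdvd : 2 ^ (c + 1) ∣ pvMask t := by
      apply pvTwoPowDvd
      intro j hj
      rw [pvTestBit_mask, decide_eq_true_eq] at hj
      exact hpw.1 j hj
    obtain ⟨a, ha⟩ := hdvd
    have hor : 2 ^ c + pvMask t = 2 ^ c ||| pvMask t := by
      rw [ha, Nat.add_comm, Nat.two_pow_add_eq_or_of_lt
        (Nat.pow_lt_pow_right one_lt_two (Nat.lt_succ_self c)) a, Nat.lor_comm]
    show s + 2 ^ c + pvMask t = s + (2 ^ c ||| pvMask t)
    rw [← hor]
    omega

lemma pvAltDiff_eq (n : Nat) (a b : List String) :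
    altDiff n a b = pvMask ((List.range n).filter (fun c => a.getD c "" != b.getD c "")) := by
  unfold altDiff
  rw [pvFoldlPow _ 0 (List.Pairwise.filter _ List.pairwise_lt_range)]
  omega

lemma pvDiffBit (n : Nat) (a b : List String) (j : Nat) :
    (altDiff n a b).testBit j = true ↔ j < n ∧ a.getD j "" ≠ b.getD j "" := by
  rw [pvAltDiff_eq, pvTestBit_mask, decide_eq_true_eq, List.mem_filter, List.mem_range,
    bne_iff_ne]

-- the hitting test against one pair's difference mask is exactly "projections differ"
lemma pvPoint (N : Nat) (m : Nat) (a b : List String) :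
    ((m &&& altDiff N a b != 0) = true) ↔
      ((pvCmb N m).map (fun k => a.getD k "") ≠ (pvCmb N m).map (fun k => b.getD k "")) := by
  rw [bne_iff_ne, Ne, Ne, not_iff_not, pvAndZero, List.map_eq_map_iff]
  constructor
  · intro h k hk
    obtain ⟨hkN, hkbit⟩ := pvMem_cmb.mp hk
    by_contra hne
    exact h k ⟨hkbit, (pvDiffBit N a b k).mpr ⟨hkN, hne⟩⟩
  · intro h j hj
    obtain ⟨hjN, hne⟩ := (pvDiffBit N a b j).mp hj.2
    exact hne (h j (pvMem_cmb.mpr ⟨hjN, hj.1⟩))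

-- the diffs accumulator: 'all P' over it is 'P holds on every pair'
lemma pvFold_all (n : Nat) (P : Nat → Bool) :
    ∀ (l : List (List String)) (d0 : PySem.Set Nat) (s0 : List (List String)),
      ((l.foldl (fun (st : PySem.Set Nat × List (List String)) row =>
          (st.2.foldl (fun ds prev => PySem.Set.add ds (altDiff n prev row)) st.1,
           st.2 ++ [row])) (d0, s0)).1.all P = true)
      ↔ (∀ x ∈ d0, P x = true) ∧ (∀ a ∈ s0, ∀ b ∈ l, P (altDiff n a b) = true)
          ∧ l.Pairwise (fun a b => P (altDiff n a b) = true) := by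
  intro l
  induction l with
  | nil =>
    intro d0 s0
    simp [List.all_eq_true]
  | cons b t ih =>
    intro d0 s0
    rw [List.foldl_cons, ih]
    constructor
    · rintro ⟨h1, h2, h3⟩
      refine ⟨fun x hx => h1 x ((PySem.Set.mem_foldl_add s0 _ d0 x).mpr (Or.inl hx)), ?_, ?_⟩
      · intro a ha c hc
        rcases List.mem_cons.mp hc with rfl | hct
        · exact h1 _ ((PySem.Set.mem_foldl_add s0 _ d0 _).mpr (Or.inr ⟨a, ha, rfl⟩))
        · exact h2 a (List.mem_append.mpr (Or.inl ha)) c hct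
      · rw [List.pairwise_cons]
        exact ⟨fun c hc => h2 b (List.mem_append.mpr (Or.inr List.mem_cons_self)) c hc, h3⟩
    · rintro ⟨h1, h2, h3⟩
      rw [List.pairwise_cons] at h3
      refine ⟨?_, ?_, h3.2⟩
      · intro x hx
        rcases (PySem.Set.mem_foldl_add s0 _ d0 x).mp hx with hx | ⟨a, ha, rfl⟩
        · exact h1 x hx
        · exact h2 a ha b List.mem_cons_self
      · intro a ha c hc
        rcases List.mem_append.mp ha with ha | ha
        · exact h2 a ha c (List.mem_cons_of_mem b hc)
        · rw [List.mem_singleton] at ha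
          subst ha
          exact h3.1 c hc

-- key-ness (hits) is exactly projection uniqueness
lemma pvHits_iff (relation : List (List String)) (m : Nat) :
    altHits (altDiffs (pvN relation) relation) m = pvUq relation m := by
  rw [Bool.eq_iff_iff]
  unfold altHits altDiffs
  rw [List.all_eq_true]
  have hchar := pvFold_all (pvN relation) (fun d => m &&& d != 0) relation PySem.Set.empty []
  rw [← List.all_eq_true, hchar]
  simp only [PySem.Set.empty, List.not_mem_nil, implies_true, true_and,
    IsEmpty.forall_iff]
  unfold pvUq pvProj
  rw [decide_eq_true_eq]
  have hnd : (relation.map (fun row => (pvCmb (pvN relation) m).map (fun k => row.getD k ""))).Nodup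
      ↔ relation.Pairwise (fun a b =>
        (pvCmb (pvN relation) m).map (fun k => a.getD k "") ≠
        (pvCmb (pvN relation) m).map (fun k => b.getD k "")) := by
    simp [List.Nodup, List.pairwise_map]
  rw [hnd]
  constructor
  · intro h
    exact h.imp_of_mem (fun {a b} _ _ hab => (pvPoint (pvN relation) m a b).mp hab)
  · intro h
    exact h.imp_of_mem (fun {a b} _ _ hab => (pvPoint (pvN relation) m a b).mpr hab)

-- key-ness is monotone under adding columns
lemma pvHitsMono {D : PySem.Set Nat} {k m : Nat} (hsub : k &&& m = k)
    (h : altHits D k = true) : altHits D m = true := by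
  unfold altHits at *
  rw [List.all_eq_true] at *
  intro d hd
  have hk := h d hd
  rw [bne_iff_ne] at hk ⊢
  intro h0
  apply hk
  rw [pvAndZero] at h0 ⊢
  intro j hj
  exact h0 j ⟨(pvSubmask_iff k m).mp hsub j hj.1, hj.2⟩

-- the bit list B builds is the mask's column list, mapped to powers
lemma pvBits_eq (n m : Nat) :
    (List.range n).filter (fun c => m &&& 2 ^ c != 0) = pvCmb n m := by
  unfold pvCmb
  apply List.filter_congr
  intro c _
  rw [Nat.and_two_pow]
  cases h : m.testBit c
  · simp
  · simp

-- a duplicate-free list of length ≥ 2 has an element different from any given one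
lemma pvTwoDistinct {l : List Nat} (hnd : l.Nodup) (hlen : 2 ≤ l.length) (c : Nat) :
    ∃ c' ∈ l, c' ≠ c := by
  match l, hlen with
  | x :: y :: t, _ =>
    rw [List.nodup_cons] at hnd
    by_cases hx : x = c
    · refine ⟨y, List.mem_cons_of_mem x List.mem_cons_self, ?_⟩
      intro hy
      exact hnd.1 (by rw [hx, ← hy]; exact List.mem_cons_self)
    · exact ⟨x, List.mem_cons_self, hx⟩

-- B's per-mask test is exactly minimality
lemma pvPred_iff (relation : List (List String)) (m : Nat) (hm0 : m ≠ 0)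
    (hmlt : m < 2 ^ pvN relation) :
    altPred (pvN relation) (altDiffs (pvN relation) relation) m = pvMin relation m := by
  set N := pvN relation with hN
  set D := altDiffs N relation with hD
  have hcne : pvCmb N m ≠ [] := pvCmb_ne_nil hm0 hmlt
  have hcnd : (pvCmb N m).Nodup := List.Nodup.filter _ List.nodup_range
  rw [Bool.eq_iff_iff]
  unfold altPred
  simp only [pvBits_eq, pvMin, Bool.and_eq_true, Bool.or_eq_true, beq_iff_eq,
    List.all_eq_true, List.length_map, bne_iff_ne, ne_eq, decide_eq_true_eq,
    Bool.not_eq_true', List.mem_map]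
  constructor
  · rintro ⟨hH, hrest⟩
    have hU : pvUq relation m = true := by rw [← pvHits_iff]; exact hH
    refine ⟨⟨hm0, hU⟩, ?_⟩
    intro k hklt hk0 hkand
    rw [Bool.eq_false_iff]
    intro hkU
    have hkH : altHits D k = true := by rw [hD, hN, pvHits_iff]; exact hkU
    -- pick a column of m that k misses
    have hex : ∃ c, m.testBit c = true ∧ k.testBit c = false := by
      by_contra hc
      have : m &&& k = m := by
        rw [pvSubmask_iff]
        intro j hj
        cases hk : k.testBit j
        · exact absurd ⟨j, hj, hk⟩ hc
        · rfl
      have := pvSubmask_antisymm hkand this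
      omega
    obtain ⟨c, hmc, hkc⟩ := hex
    have hcN : c < N := pvBitLt hmlt hmc
    have hkdrop : k &&& (m ^^^ 2 ^ c) = k := by
      rw [pvSubmask_iff]
      intro j hj
      have hjm := (pvSubmask_iff k m).mp hkand j hj
      have hjc : j ≠ c := fun he => by rw [he, hkc] at hj; exact Bool.false_ne_true hj
      rw [Nat.testBit_xor, hjm, Nat.testBit_two_pow]
      simp [Ne.symm hjc]
    rcases hrest with hlen1 | hall
    · -- m is a single column: it has no nonzero proper submask
      have : ∃ c0, pvCmb N m = [c0] := by
        match h : pvCmb N m, hlen1 with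
        | [c0], _ => exact ⟨c0, rfl⟩
      obtain ⟨c0, hc0⟩ := this
      have hm2 : m = 2 ^ c0 := by
        have := pvMask_cmb (N := N) (m := m) hmlt
        rw [hc0] at this
        simpa [pvMask] using this.symm
      obtain ⟨j, hj⟩ := pvExistsBit hk0
      have hjc0 : c0 = j := by
        have := (pvSubmask_iff k m).mp hkand j hj
        rw [hm2, Nat.testBit_two_pow, decide_eq_true_eq] at this
        exact this
      have : k = m := by
        apply Nat.eq_of_testBit_eq
        intro i
        cases hmi : m.testBit i
        · cases hki : k.testBit i
          · rfl
          · exact absurd ((pvSubmask_iff k m).mp hkand i hki) (by rw [hmi]; simp)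
        · have hic0 : c0 = i := by
            rw [hm2, Nat.testBit_two_pow, decide_eq_true_eq] at hmi
            exact hmi
          rw [← hic0, hjc0]
          exact hj
      omega
    · -- dropping column c keeps k a key, contradicting the all-drops test
      have hmem : ∃ x ∈ pvCmb N m, 2 ^ x = 2 ^ c :=
        ⟨c, pvMem_cmb.mpr ⟨hcN, hmc⟩, rfl⟩
      have hdropF := hall (2 ^ c) hmem
      have := pvHitsMono hkdrop hkH
      rw [hdropF] at this
      exact Bool.false_ne_true this
  · rintro ⟨⟨_, hU⟩, hmin⟩
    have hH : altHits D m = true := by rw [hD, hN, pvHits_iff]; exact hU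
    refine ⟨hH, ?_⟩
    by_cases hlen1 : (pvCmb N m).length = 1
    · exact Or.inl hlen1
    · right
      rintro b ⟨c, hc, rfl⟩
      obtain ⟨hcN, hmc⟩ := pvMem_cmb.mp hc
      set k := m ^^^ 2 ^ c with hk
      have hkand : k &&& m = k := by
        rw [pvSubmask_iff]
        intro j hj
        rw [hk, Nat.testBit_xor, Nat.testBit_two_pow] at hj
        by_cases hjc : c = j
        · rw [← hjc] at hj
          rw [hmc] at hj
          simp at hj
        · simpa [hjc] using hj
      have hkc : k.testBit c = false := by
        rw [hk, Nat.testBit_xor, hmc, Nat.testBit_two_pow]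
        simp
      have hkne : k ≠ m := by
        intro he
        rw [he] at hkc
        rw [hmc] at hkc
        exact Bool.false_ne_true hkc.symm
      have hklt : k < m := lt_of_le_of_ne (pvSubmask_le hkand) hkne
      have hk0 : k ≠ 0 := by
        have hlen2 : 2 ≤ (pvCmb N m).length := by
          have : (pvCmb N m).length ≠ 0 := fun he => hcne (List.length_eq_zero_iff.mp he)
          omega
        obtain ⟨c', hc', hne⟩ := pvTwoDistinct hcnd hlen2 c
        obtain ⟨_, hmc'⟩ := pvMem_cmb.mp hc'
        intro he
        have : k.testBit c' = true := by
          rw [hk, Nat.testBit_xor, hmc', Nat.testBit_two_pow]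
          simp [Ne.symm hne]
        rw [he, Nat.zero_testBit] at this
        exact Bool.false_ne_true this
      have := hmin k hklt hk0 hkand
      rw [← pvHits_iff, ← hN, ← hD] at this
      exact this

-- ===== VERDICT (by name: the statement is the Claim_ definition above) =====
theorem solution_spec : Claim_equal_solution := by
  intro relation _hdom hpre
  obtain ⟨hne, hall⟩ := hpre
  have hall' : ∀ r ∈ relation, pvN relation ≤ r.length := hall
  unfold Spec_solution
  show solution relation = solution_alt relation
  simp only [solution, solution_alt]
  rw [show (relation.headD []).length = pvN relation from rfl]
  rw [pvKeyIdxSet_eq]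
  rw [pvLoop_spec relation hne hall' (pvL0 (pvN relation)).length (pvL0 (pvN relation)) 0 0
      (by omega) (List.Sublist.refl _) ?inv]
  case inv =>
    intro c hc m hm hsub hnem
    have hmle : m ≤ pvMask c := pvSubmask_le hsub
    have hcL0 := pvMem_L0.mp hc
    have hlt : pvMask c < 2 ^ pvN relation :=
      pvMask_lt (fun k hk => List.mem_range.mp (hcL0.1.subset hk))
    have hm0 : m ≠ 0 := by
      intro h; rw [h] at hm; simp [pvMin] at hm
    exact pvMem_L0.mpr ⟨List.filter_sublist, pvCmb_ne_nil hm0 (lt_of_le_of_lt hmle hlt)⟩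
  rw [PySem.List.foldl_count_if]
  rw [List.drop_zero]
  have hcnt : (List.range' 1 (2 ^ pvN relation - 1)).countP
      (altPred (pvN relation) (altDiffs (pvN relation) relation)) =
      (List.range' 1 (2 ^ pvN relation - 1)).countP (fun m => pvMin relation m) := by
    apply List.countP_congr
    intro m hm
    rw [List.mem_range'_1] at hm
    have h1 : (1 : Nat) ≤ 2 ^ pvN relation := Nat.one_le_two_pow
    rw [pvPred_iff relation m (by omega) (by omega)]
  rw [hcnt]
  have hcp : (pvL0 (pvN relation)).countP (fun c => pvMin relation (pvMask c))
      = (List.range' 1 (2 ^ pvN relation - 1)).countP (fun m => pvMin relation m) := by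
    have h1 : (pvL0 (pvN relation)).countP (fun c => pvMin relation (pvMask c))
        = ((pvL0 (pvN relation)).map pvMask).countP (fun m => pvMin relation m) := by
      rw [List.countP_map]; rfl
    rw [h1, (pvPerm (pvN relation)).countP_eq]
  rw [hcp]
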